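-- pv_equiv track=rewrite | github.com/jowuoz/over-under | src/scrapers/flashscore_scraper.py | _group_key_value_data
-- ===== SOURCE A (Python) =====
-- from typing import Dict, List, Optional, Tuple, Any
--
-- def _group_key_value_data(data: Dict) -> List[Dict]:
--     """
--     Group key-value data into individual events
--
--     Args:
--         data: Flat key-value dictionary
--
--     Returns:
--         List of event dictionaries
--     """
--     events = []
--     current_event = {}
--
--     # Simple grouping logic - FlashScore's actual format is more complex
--     for key, value in data.items():
--         if key.startswith('AA'):
--             if current_event:
--                 events.append(current_event)
--                 current_event = {}
--
--         current_event[key] = value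
--
--     if current_event:
--         events.append(current_event)
--
--     return events
-- ===== SOURCE B (Python) =====
-- def _group_key_value_data(data):
--     """Group flat key-value dict into event dicts: segment-scan version.
--
--     Instead of accumulating and flushing a current dict, scan for each
--     segment's end (the next 'AA' key) and build each event from the slice.
--     """
--     items = list(data.items())
--     events = []
--     i, n = 0, len(items)
--     while i < n:
--         j = i + 1
--         while j < n and not items[j][0].startswith('AA'):
--             j += 1
--         events.append(dict(items[i:j]))
--         i = j
--     return events
-- ===== Notes on version B (the rewrite author's own statement) =====
-- stated objective: alternative
-- what changed: Replaced the accumulate-and-flush loop over a mutable current dict with a segment scan: advance a pointer to the next 'AA' key and build each event directly from the slice.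
import Mathlib
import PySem

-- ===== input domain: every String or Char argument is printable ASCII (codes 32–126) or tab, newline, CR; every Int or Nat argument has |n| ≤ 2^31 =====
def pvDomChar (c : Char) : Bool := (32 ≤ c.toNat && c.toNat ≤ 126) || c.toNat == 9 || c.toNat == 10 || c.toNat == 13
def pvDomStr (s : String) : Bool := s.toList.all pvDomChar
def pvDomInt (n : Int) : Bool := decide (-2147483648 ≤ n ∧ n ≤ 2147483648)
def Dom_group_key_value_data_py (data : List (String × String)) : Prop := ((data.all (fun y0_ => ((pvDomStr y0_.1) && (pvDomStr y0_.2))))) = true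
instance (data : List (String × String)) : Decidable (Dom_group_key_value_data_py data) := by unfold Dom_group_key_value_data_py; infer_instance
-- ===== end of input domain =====

-- B replaces A's accumulate-and-flush loop with a segment scan that slices each
-- event out between consecutive 'AA' boundaries (alternative decomposition, same cost).


-- ===== PORT A =====
-- one iteration of A's loop: flush current_event on an 'AA' key, then current_event[key] = value
def groupStep (st : List (PySem.Dict String String) × PySem.Dict String String)
    (p : String × String) : List (PySem.Dict String String) × PySem.Dict String String :=
  let st' := if PySem.Str.startswith p.1 "AA" then
               (if st.2.items.isEmpty then st else (st.1 ++ [st.2], PySem.Dict.empty))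
             else st
  (st'.1, st'.2.insert p.1 p.2)

-- final 'if current_event: events.append(current_event)'
def groupFinish (st : List (PySem.Dict String String) × PySem.Dict String String) :
    List (List (String × String)) :=
  (if st.2.items.isEmpty then st.1 else st.1 ++ [st.2]).map PySem.Dict.items

def group_key_value_data_py (data : List (String × String)) : List (List (String × String)) :=
  groupFinish (data.foldl groupStep ([], PySem.Dict.empty))

-- ===== PORT B =====
-- an item that does NOT start a new segment (the inner while's continue condition)
def pvNotAA (q : String × String) : Bool := !(PySem.Str.startswith q.1 "AA")

-- Source B's outer while loop: each pass takes the segment from i to the next 'AA' key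
-- (inner while = takeWhile/dropWhile) and builds dict(items[i:j]).
def groupSegs : List (String × String) → List (List (String × String))
  | [] => []
  | p :: rest =>
      (PySem.Dict.ofList (p :: rest.takeWhile pvNotAA)).items ::
        groupSegs (rest.dropWhile pvNotAA)
termination_by l => l.length
decreasing_by
  simp only [List.length_cons]
  exact Nat.lt_succ_of_le (List.length_dropWhile_le _ _)

def group_key_value_data_py_alt (data : List (String × String)) : List (List (String × String)) :=
  groupSegs data

-- ===== PRECONDITION & SPEC =====
def Spec_group_key_value_data_py (data : List (String × String)) (out : List (List (String × String))) : Prop := out = group_key_value_data_py_alt data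
instance (data : List (String × String)) (out : List (List (String × String))) : Decidable (Spec_group_key_value_data_py data out) := by unfold Spec_group_key_value_data_py; infer_instance

-- ===== CLAIM (what is proved, stated in full; the proofs are below) =====
def Claim_equal_group_key_value_data_py : Prop := ∀ (data : List (String × String)), Dom_group_key_value_data_py data → Spec_group_key_value_data_py data (group_key_value_data_py data)

-- ===== LEMMAS AND PROOFS =====

lemma insert_items_isEmpty (d : PySem.Dict String String) (k v : String) :
    ((d.insert k v).items.isEmpty) = false := by
  rw [List.isEmpty_eq_false_iff, PySem.Dict.items_insert]
  split <;> simp_all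
  rename_i h
  rw [PySem.Dict.contains_iff_mem_keys] at h
  simp only [PySem.Dict.keys] at h
  intro he; simp [he] at h

lemma eq_empty_of_items_isEmpty (d : PySem.Dict String String)
    (h : d.items.isEmpty = true) : d = PySem.Dict.empty := by
  apply PySem.Dict.ext
  simpa [List.isEmpty_iff] using h

lemma groupSegs_cons (p : String × String) (rest : List (String × String)) :
    groupSegs (p :: rest) =
      (PySem.Dict.ofList (p :: rest.takeWhile pvNotAA)).items ::
        groupSegs (rest.dropWhile pvNotAA) := by
  rw [groupSegs]

lemma ofList_cons_items (p : String × String) (seg : List (String × String)) :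
    PySem.Dict.ofList (p :: seg) = (PySem.Dict.empty.insert p.1 p.2).update seg := rfl

-- invariant of A's loop relating it to B's segments
lemma group_main (l : List (String × String)) :
    ∀ (events : List (PySem.Dict String String)) (cur : PySem.Dict String String),
      groupFinish (l.foldl groupStep (events, cur)) =
        events.map PySem.Dict.items ++
          (if cur.items.isEmpty then groupSegs l
           else (cur.update (l.takeWhile pvNotAA)).items :: groupSegs (l.dropWhile pvNotAA)) := by
  induction l with
  | nil =>
      intro events cur
      by_cases hcur : cur.items.isEmpty = true
      · simp [groupFinish, hcur, groupSegs]
      · simp only [List.foldl_nil, groupFinish, hcur, List.takeWhile_nil, List.dropWhile_nil,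
          if_false, Bool.false_eq_true, groupSegs]
        simp [PySem.Dict.update]
  | cons p rest IH =>
      intro events cur
      rw [List.foldl_cons]
      by_cases hAA : PySem.Str.startswith p.1 "AA" = true
      · have hAA2 : PySem.Chars.startswith p.1.toList ['A', 'A'] = true := by
          simpa [PySem.Str.startswith] using hAA
        by_cases hcur : cur.items.isEmpty = true
        · have hc := eq_empty_of_items_isEmpty cur hcur
          subst hc
          rw [show groupStep (events, PySem.Dict.empty) p
                = (events, PySem.Dict.empty.insert p.1 p.2) by
              simp [groupStep, hAA2, PySem.Dict.empty]]
          rw [IH, insert_items_isEmpty]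
          rw [if_pos hcur, groupSegs_cons, ofList_cons_items]
          simp
        · have hne : ¬ cur.items = [] := by
            intro h; exact hcur (by simp [h])
          rw [show groupStep (events, cur) p
                = (events ++ [cur], PySem.Dict.empty.insert p.1 p.2) by
              simp [groupStep, hAA2, hne]]
          rw [IH, insert_items_isEmpty]
          have hp : pvNotAA p = false := by simp [pvNotAA, hAA2]
          simp only [Bool.false_eq_true, if_false, if_neg hcur, List.map_append,
            List.takeWhile_cons, List.dropWhile_cons, hp, groupSegs_cons,
            ofList_cons_items]
          simp [PySem.Dict.update]
      · have hAA3 : PySem.Chars.startswith p.1.toList ['A', 'A'] = false :=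
          Bool.eq_false_iff.mpr (fun h => hAA (by simpa [PySem.Str.startswith] using h))
        rw [show groupStep (events, cur) p = (events, cur.insert p.1 p.2) by
              simp [groupStep, hAA3]]
        rw [IH, insert_items_isEmpty]
        have hp : pvNotAA p = true := by simp [pvNotAA, hAA3]
        by_cases hcur : cur.items.isEmpty = true
        · have hc := eq_empty_of_items_isEmpty cur hcur
          subst hc
          rw [if_pos hcur, groupSegs_cons, ofList_cons_items]
          simp
        · simp only [Bool.false_eq_true, if_false, if_neg hcur,
            List.takeWhile_cons, List.dropWhile_cons, hp]
          rfl

-- ===== VERDICT (by name: the statement is the Claim_ definition above) =====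
theorem group_key_value_data_py_spec : Claim_equal_group_key_value_data_py := by
  intro data _
  unfold Spec_group_key_value_data_py group_key_value_data_py group_key_value_data_py_alt
  rw [group_main data [] PySem.Dict.empty]
  simp [PySem.Dict.empty]
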